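-- pv_equiv track=rewrite | github.com/1akin1/2048-ai-expectimax | 2048.py | _simulate_move_left
-- ===== SOURCE A (Python) =====
-- GRID_SIZE = 4
--
-- def _simulate_move_left(grid):
--     moved = False
--     for i in range(GRID_SIZE):
--         for j in range(1, GRID_SIZE):
--             if grid[i][j] != 0:
--                 k = j
--                 while k > 0 and grid[i][k-1] == 0:
--                     grid[i][k-1] = grid[i][k]
--                     grid[i][k] = 0
--                     k -= 1
--                     moved = True
--
--                 if k > 0 and grid[i][k-1] == grid[i][k]:
--                     grid[i][k-1] *= 2
--                     grid[i][k] = 0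
--                     moved = True
--     return moved
-- ===== SOURCE B (Python) =====
-- GRID_SIZE = 4
--
-- def _simulate_move_left(grid):
--     # Return-value equivalence proved; B mutates grid's rows in place like A does.
--     moved = False
--     for i in range(GRID_SIZE):
--         row = grid[i]
--         old = row[:GRID_SIZE]
--         stack = []
--         for v in old:
--             if v != 0:
--                 if stack and stack[-1] == v:
--                     stack[-1] = v * 2
--                 else:
--                     stack.append(v)
--         new = stack + [0] * (GRID_SIZE - len(stack))
--         for j in range(GRID_SIZE):
--             row[j] = new[j]
--         if new != old:
--             moved = True
--     return moved
-- ===== Notes on version B (the rewrite author's own statement) =====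
-- stated objective: simpler
-- what changed: A slides each cell left step-by-step with a while loop and merges via index juggling on the mutated row; B rebuilds each row in one pass by folding its nonzero cells onto a stack (doubling the top on an equal neighbour), pads with zeros, writes it back, and derives the moved flag by comparing with a snapshot of the row.
import Mathlib
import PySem

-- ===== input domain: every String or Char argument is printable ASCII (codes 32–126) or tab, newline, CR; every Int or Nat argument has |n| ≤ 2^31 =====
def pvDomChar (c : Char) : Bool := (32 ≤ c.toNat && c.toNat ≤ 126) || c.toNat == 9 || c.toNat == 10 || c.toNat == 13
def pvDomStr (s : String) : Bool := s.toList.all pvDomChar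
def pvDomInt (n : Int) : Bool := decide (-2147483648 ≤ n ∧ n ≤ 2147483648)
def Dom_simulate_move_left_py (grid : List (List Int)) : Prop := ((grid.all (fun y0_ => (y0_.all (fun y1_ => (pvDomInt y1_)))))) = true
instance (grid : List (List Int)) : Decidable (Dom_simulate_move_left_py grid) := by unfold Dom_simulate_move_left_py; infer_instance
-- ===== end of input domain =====

-- B replaces A's in-place shift/merge index juggling by a per-row stack fold over the
-- nonzero cells plus a snapshot comparison for the flag (objective: simpler); both A and B
-- mutate the grid's rows in place the same way; the equivalence proved is about the
-- returned 'moved' flag.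

-- ===== PORT A =====
-- the inner 'while k > 0 and grid[i][k-1] == 0' loop; returns the final k, the row, moved
def pvSlideA : Nat → List Int → Bool → (Nat × List Int × Bool)
  | 0, row, m => (0, row, m)
  | k+1, row, m =>
    if row.getD k 0 = 0 then
      pvSlideA k ((row.set k (row.getD (k+1) 0)).set (k+1) 0) true
    else (k+1, row, m)

-- one iteration of the 'for j in range(1, GRID_SIZE)' body
def pvJStepA (row : List Int) (m : Bool) (j : Nat) : List Int × Bool :=
  if row.getD j 0 ≠ 0 then
    let s := pvSlideA j row m
    let k := s.1
    let row := s.2.1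
    let m := s.2.2
    if k > 0 ∧ row.getD (k-1) 0 = row.getD k 0 then
      ((row.set (k-1) (row.getD (k-1) 0 * 2)).set k 0, true)
    else (row, m)
  else (row, m)

def pvRowA (row : List Int) (m : Bool) : List Int × Bool :=
  [1, 2, 3].foldl (fun s j => pvJStepA s.1 s.2 j) (row, m)

def simulate_move_left_py (grid : List (List Int)) : Bool :=
  ([0, 1, 2, 3].foldl
    (fun (s : List (List Int) × Bool) i =>
      let r := pvRowA (s.1.getD i []) s.2
      (s.1.set i r.1, r.2))
    (grid, false)).2

-- ===== PORT B =====
-- the stack fold over one row's first GRID_SIZE cells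
def pvStackB (old : List Int) : List Int :=
  old.foldl (fun st v =>
    if v ≠ 0 then
      if st ≠ [] ∧ st.getLast? = some v then st.dropLast ++ [v * 2] else st ++ [v]
    else st) []

-- the merged-and-padded new row
def pvRowB (row : List Int) : List Int :=
  let st := pvStackB (row.take 4)
  st ++ List.replicate (4 - st.length) 0

def simulate_move_left_py_alt (grid : List (List Int)) : Bool :=
  (grid.take 4).foldl (fun m row => if pvRowB row ≠ row.take 4 then true else m) false

-- ===== PRECONDITION & SPEC =====
-- A indexes grid[0..3][0..3]; on a grid with fewer than 4 rows, or with a row among the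
-- first 4 that has fewer than 4 cells, Python A raises IndexError — exactly those inputs
-- are excluded.
def Pre_simulate_move_left_py (grid : List (List Int)) : Prop :=
  4 ≤ grid.length ∧ ∀ r ∈ grid.take 4, 4 ≤ r.length
instance (grid : List (List Int)) : Decidable (Pre_simulate_move_left_py grid) := by
  unfold Pre_simulate_move_left_py; infer_instance

def pvWitness_simulate_move_left_py : List (List Int) :=
  [[2, 2, 4, 0], [0, 0, 0, 0], [2, 0, 2, 4], [8, 8, 8, 8]]

def Spec_simulate_move_left_py (grid : List (List Int)) (out : Bool) : Prop := out = simulate_move_left_py_alt grid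
instance (grid : List (List Int)) (out : Bool) : Decidable (Spec_simulate_move_left_py grid out) := by unfold Spec_simulate_move_left_py; infer_instance

-- ===== CLAIM (what is proved, stated in full; the proofs are below) =====
def Claim_equal_simulate_move_left_py : Prop := ∀ (grid : List (List Int)), Dom_simulate_move_left_py grid → Pre_simulate_move_left_py grid → Spec_simulate_move_left_py grid (simulate_move_left_py grid)

-- ===== LEMMAS AND PROOFS =====

-- the j = 1 loop body of A on an explicit 4-cell row, as an if-tree
theorem pvStep1 (a b c d : Int) (rest : List Int) (m : Bool) :
    pvJStepA (a::b::c::d::rest) m 1 =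
      (if b = 0 then ((a::b::c::d::rest), m)
       else if a ≠ 0 then (if a = b then ((a*2::0::c::d::rest), true) else ((a::b::c::d::rest), m))
       else ((b::0::c::d::rest), true)) := by
  simp only [pvJStepA, pvSlideA, List.getD, List.set, List.getElem?_cons_zero,
    List.getElem?_cons_succ, Option.getD_some]
  split_ifs <;> simp_all

-- the j = 2 loop body of A
theorem pvStep2 (x y c d : Int) (rest : List Int) (m : Bool) :
    pvJStepA (x::y::c::d::rest) m 2 =
      (if c = 0 then ((x::y::c::d::rest), m)
       else if y ≠ 0 then (if y = c then ((x::y*2::0::d::rest), true) else ((x::y::c::d::rest), m))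
       else if x ≠ 0 then (if x = c then ((x*2::0::0::d::rest), true) else ((x::c::0::d::rest), true))
       else ((c::0::0::d::rest), true)) := by
  simp only [pvJStepA, pvSlideA, List.getD, List.set, List.getElem?_cons_zero,
    List.getElem?_cons_succ, Option.getD_some]
  split_ifs <;> simp_all

-- the j = 3 loop body of A
theorem pvStep3 (x y z d : Int) (rest : List Int) (m : Bool) :
    pvJStepA (x::y::z::d::rest) m 3 =
      (if d = 0 then ((x::y::z::d::rest), m)
       else if z ≠ 0 then (if z = d then ((x::y::z*2::0::rest), true) else ((x::y::z::d::rest), m))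
       else if y ≠ 0 then (if y = d then ((x::y*2::0::0::rest), true) else ((x::y::d::0::rest), true))
       else if x ≠ 0 then (if x = d then ((x*2::0::0::0::rest), true) else ((x::d::0::0::rest), true))
       else ((d::0::0::0::rest), true)) := by
  simp only [pvJStepA, pvSlideA, List.getD, List.set, List.getElem?_cons_zero,
    List.getElem?_cons_succ, Option.getD_some]
  split_ifs <;> simp_all

-- per-row agreement: A's processing of a row with ≥ 4 cells yields B's merged row on the
-- 4-prefix (tail untouched) and exactly the moved flag B derives by snapshot comparison
set_option maxHeartbeats 2000000 in
theorem pvRow_agree (a b c d : Int) (rest : List Int) (m : Bool) :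
    pvRowA (a :: b :: c :: d :: rest) m =
      (pvRowB (a :: b :: c :: d :: rest) ++ rest,
       m || decide (pvRowB (a :: b :: c :: d :: rest) ≠ [a, b, c, d])) := by
  simp only [pvRowA, List.foldl, pvStep1]
  split_ifs <;> simp only [pvStep2] <;> split_ifs <;> simp only [pvStep3] <;> split_ifs <;>
    simp_all [pvRowB, pvStackB] <;>
    first
      | (split_ifs <;> simp_all)
      | (refine Or.inr ?_; omega)

theorem pvMain (grid : List (List Int)) (hpre : Pre_simulate_move_left_py grid) :
    simulate_move_left_py grid = simulate_move_left_py_alt grid := by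
  obtain ⟨hlen, hrows⟩ := hpre
  rcases grid with _ | ⟨r0, _ | ⟨r1, _ | ⟨r2, _ | ⟨r3, gs⟩⟩⟩⟩ <;> simp at hlen
  have h0 := hrows r0 (by simp)
  have h1 := hrows r1 (by simp)
  have h2 := hrows r2 (by simp)
  have h3 := hrows r3 (by simp)
  rcases r0 with _ | ⟨a0, _ | ⟨b0, _ | ⟨c0, _ | ⟨d0, t0⟩⟩⟩⟩ <;> simp at h0
  rcases r1 with _ | ⟨a1, _ | ⟨b1, _ | ⟨c1, _ | ⟨d1, t1⟩⟩⟩⟩ <;> simp at h1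
  rcases r2 with _ | ⟨a2, _ | ⟨b2, _ | ⟨c2, _ | ⟨d2, t2⟩⟩⟩⟩ <;> simp at h2
  rcases r3 with _ | ⟨a3, _ | ⟨b3, _ | ⟨c3, _ | ⟨d3, t3⟩⟩⟩⟩ <;> simp at h3
  simp only [simulate_move_left_py, simulate_move_left_py_alt, List.foldl, List.take,
    List.getD, List.getElem?_cons_zero, List.getElem?_cons_succ, Option.getD_some,
    List.set, pvRow_agree]
  by_cases p0 : pvRowB (a0::b0::c0::d0::t0) ≠ [a0,b0,c0,d0] <;>
  by_cases p1 : pvRowB (a1::b1::c1::d1::t1) ≠ [a1,b1,c1,d1] <;>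
  by_cases p2 : pvRowB (a2::b2::c2::d2::t2) ≠ [a2,b2,c2,d2] <;>
  by_cases p3 : pvRowB (a3::b3::c3::d3::t3) ≠ [a3,b3,c3,d3] <;>
    simp_all

-- ===== VERDICT (by name: the statement is the Claim_ definition above) =====
theorem simulate_move_left_py_spec : Claim_equal_simulate_move_left_py := by
  intro grid _ hpre
  exact pvMain grid hpre
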